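-- pv_equiv track=rewrite | github.com/feadoor/hackerrank | practice/algorithms/strings/highest_value_palindrome.py | highest_palindrome
-- ===== SOURCE A (Python) =====
-- def non_matching_count(s):
--     return sum(s[x] != s[len(s) - x - 1] for x in range(len(s) // 2))
--
-- def highest_palindrome(s, changes_allowed):
--     changes_required = non_matching_count(s)
--     if changes_required > changes_allowed:
--         return -1
--
--     new_left = ''
--     for idx in range(len(s) // 2):
--
--         if s[idx] == s[len(s) - 1 - idx]:
--             if s[idx] != '9' and changes_allowed >= changes_required + 2:
--                 new_left += '9'
--                 changes_allowed -= 2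
--             else:
--                 new_left += s[idx]
--
--         else:
--             if s[idx] == '9' or s[len(s) - 1 - idx] == '9':
--                 new_left += '9'
--                 changes_allowed -= 1
--                 changes_required -= 1
--             elif changes_allowed >= changes_required + 1:
--                 new_left += '9'
--                 changes_allowed -= 2
--                 changes_required -= 1
--             else:
--                 new_left += max(s[idx], s[len(s) - 1 - idx])
--                 changes_allowed -= 1
--                 changes_required -= 1
--
--     middle_char = '' if len(s) % 2 == 0 else '9' if changes_allowed > 0 else s[len(s) // 2]
--     return new_left + middle_char + new_left[::-1]
-- ===== SOURCE B (Python) =====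
-- def _upgrade(rest, restc, leftover):
--     # one leftover unit (possible only after skipping a cost-2 pair) buys the
--     # first later cost-1 pair; after that the budget is exhausted
--     if leftover == 1:
--         for j, w in enumerate(restc):
--             if w == 1:
--                 return rest[:j] + ['9'] + rest[j + 1:], 1
--     return rest, 0
--
-- def highest_palindrome(s, changes_allowed):
--     n = len(s)
--     half = n // 2
--     pairs = list(zip(s[:half], reversed(s[n - half:])))
--     mism = sum(a != b for a, b in pairs)
--     if mism > changes_allowed:
--         return -1
--     k = changes_allowed - mism  # spare budget beyond the forced fixes
--     base = ['9' if '9' in (a, b) else max(a, b) for a, b in pairs]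
--     cost = [0 if c == '9' else 1 if a != b else 2
--             for c, (a, b) in zip(base, pairs)]
--     # prefix-sum cutoff: the maximal affordable prefix of pairs gets upgraded
--     run, taken = 0, 0
--     for w in cost:
--         if run + w > k:
--             break
--         run += w
--         taken += 1
--     rest, extra = _upgrade(base[taken:], cost[taken:], k - run)
--     spent = run + extra
--     left = '9' * taken + ''.join(rest)
--     mid = '' if n % 2 == 0 else ('9' if k - spent > 0 else s[half])
--     return left + mid + left[::-1]
-- ===== Notes on version B (the rewrite author's own statement) =====
-- stated objective: alternative
-- what changed: Replaces A's budget-decrementing greedy branch cascade with coupled counters by a staged closed-form allocation: build the base palindrome and a per-pair upgrade cost (0/1/2), upgrade the maximal affordable prefix found by a prefix-sum cutoff, and spend the at-most-one leftover unit on the first later cost-1 pair.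
-- outside the precondition, e.g. on highest_palindrome('12', 0): A returns -1, B returns -1
import Mathlib
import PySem

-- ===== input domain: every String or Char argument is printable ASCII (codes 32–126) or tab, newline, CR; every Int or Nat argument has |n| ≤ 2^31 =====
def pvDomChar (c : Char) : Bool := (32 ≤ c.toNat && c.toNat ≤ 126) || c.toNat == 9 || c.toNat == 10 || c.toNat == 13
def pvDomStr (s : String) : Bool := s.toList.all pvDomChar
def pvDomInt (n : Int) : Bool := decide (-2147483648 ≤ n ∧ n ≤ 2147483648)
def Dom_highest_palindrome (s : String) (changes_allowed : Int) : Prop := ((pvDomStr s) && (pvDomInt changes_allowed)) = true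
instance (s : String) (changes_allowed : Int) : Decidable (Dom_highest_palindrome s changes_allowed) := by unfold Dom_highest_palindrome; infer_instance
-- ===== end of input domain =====

-- B replaces A's budget-decrementing greedy branch cascade by a staged closed-form
-- allocation (base palindrome + per-pair costs, prefix-sum cutoff, one leftover lookup);
-- objective: alternative (same O(n) cost, different algorithmic structure).


-- shared final assembly: left + middle_char + left[::-1] (this step is identical in both Pythons)
def pvAssemble (cs : List Char) (left : List Char) (rem : Int) : String :=
  String.ofList (left ++
    (if cs.length % 2 = 0 then [] else if rem > 0 then ['9'] else [cs.getD (cs.length / 2) ' ']) ++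
    left.reverse)

-- ===== PORT A =====
-- s[x] for 0 ≤ x < len(s): always in range inside the loops, so getD is exact there.
def pvNonMatchingCount (cs : List Char) : Int :=
  ((List.range (cs.length / 2)).filter
    (fun x => cs.getD x ' ' ≠ cs.getD (cs.length - x - 1) ' ')).length

-- one iteration of A's loop body; state = (new_left, changes_allowed, changes_required)
def pvStepA (cs : List Char) (n : Nat) (st : List Char × Int × Int) (idx : Nat) :
    List Char × Int × Int :=
  let a := cs.getD idx ' '
  let b := cs.getD (n - 1 - idx) ' '
  let nl := st.1; let ca := st.2.1; let cr := st.2.2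
  if a = b then
    if a ≠ '9' ∧ ca ≥ cr + 2 then (nl ++ ['9'], ca - 2, cr)
    else (nl ++ [a], ca, cr)
  else if a = '9' ∨ b = '9' then (nl ++ ['9'], ca - 1, cr - 1)
  else if ca ≥ cr + 1 then (nl ++ ['9'], ca - 2, cr - 1)
  else (nl ++ [max a b], ca - 1, cr - 1)

def highest_palindrome (s : String) (changes_allowed : Int) : String :=
  if pvNonMatchingCount s.toList > changes_allowed then "-1"   -- Python returns the int -1 here; outside Pre_
  else
    let st := (List.range (s.toList.length / 2)).foldl (pvStepA s.toList s.toList.length)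
      ([], changes_allowed, pvNonMatchingCount s.toList)
    pvAssemble s.toList st.1 st.2.1

-- ===== PORT B =====
-- base palindrome character of a pair: '9' if '9' in (a, b) else max(a, b)
def pvBaseC (p : Char × Char) : Char :=
  if p.1 = '9' ∨ p.2 = '9' then '9' else max p.1 p.2

-- upgrade cost of a pair: 0 if c == '9' else 1 if a != b else 2
def pvCostC (bp : Char × (Char × Char)) : Int :=
  if bp.1 = '9' then 0 else if bp.2.1 ≠ bp.2.2 then 1 else 2

-- B's cutoff loop: walk the cost list while it stays affordable; returns (run, taken)
def pvFindCut : List Int → Int → Int × Nat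
  | [], _ => (0, 0)
  | w :: t, k =>
    if w > k then (0, 0)
    else (w + (pvFindCut t (k - w)).1, (pvFindCut t (k - w)).2 + 1)

-- B's _upgrade helper: one leftover unit buys the first later cost-1 pair
def pvUpgrade (rest : List Char) (restc : List Int) (leftover : Int) : List Char × Int :=
  if leftover = 1 then
    match restc.findIdx? (fun w => w == 1) with
    | some j => (rest.take j ++ '9' :: rest.drop (j + 1), 1)
    | none => (rest, 0)
  else (rest, 0)

def highest_palindrome_alt (s : String) (changes_allowed : Int) : String :=
  let cs := s.toList
  let half := cs.length / 2
  let pairs := (cs.take half).zip ((cs.drop (cs.length - half)).reverse)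
  let mism : Int := ((pairs.filter (fun p => p.1 ≠ p.2)).length : Int)
  if mism > changes_allowed then "-1"   -- Python returns the int -1 here; outside Pre_
  else
    let k := changes_allowed - mism
    let base := pairs.map pvBaseC
    let cost := (base.zip pairs).map pvCostC
    let rc := pvFindCut cost k
    let re := pvUpgrade (base.drop rc.2) (cost.drop rc.2) (k - rc.1)
    pvAssemble cs (List.replicate rc.2 '9' ++ re.1) (k - (rc.1 + re.2))

-- ===== PRECONDITION & SPEC =====
-- Pre_ excludes exactly the inputs whose mismatched-pair count exceeds changes_allowed:
-- there Python A returns the int -1, which is not a value of the declared String type.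
def Pre_highest_palindrome (s : String) (changes_allowed : Int) : Prop :=
  (((List.range (s.toList.length / 2)).filter
    (fun x => s.toList.getD x ' ' ≠ s.toList.getD (s.toList.length - x - 1) ' ')).length : Int)
    ≤ changes_allowed
instance (s : String) (changes_allowed : Int) : Decidable (Pre_highest_palindrome s changes_allowed) := by unfold Pre_highest_palindrome; infer_instance
def pvWitness_highest_palindrome : String × Int := ("3943", 1)

def Spec_highest_palindrome (s : String) (changes_allowed : Int) (out : String) : Prop := out = highest_palindrome_alt s changes_allowed
instance (s : String) (changes_allowed : Int) (out : String) : Decidable (Spec_highest_palindrome s changes_allowed out) := by unfold Spec_highest_palindrome; infer_instance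

-- ===== CLAIM (what is proved, stated in full; the proofs are below) =====
def Claim_equal_highest_palindrome : Prop := ∀ (s : String) (changes_allowed : Int), Dom_highest_palindrome s changes_allowed → Pre_highest_palindrome s changes_allowed → Spec_highest_palindrome s changes_allowed (highest_palindrome s changes_allowed)

-- ===== LEMMAS AND PROOFS =====

-- abstraction of A's loop on (base char, upgrade cost) items with the spare budget r
def pvG : List (Char × Int) → Int → List Char × Int
  | [], r => ([], r)
  | (c, w) :: t, r =>
    if 0 < w ∧ w ≤ r then ('9' :: (pvG t (r - w)).1, (pvG t (r - w)).2)
    else (c :: (pvG t r).1, (pvG t r).2)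

-- the (base, cost) item of pair index i
def pvItem (cs : List Char) (n : Nat) (i : Nat) : Char × Int :=
  (pvBaseC (cs.getD i ' ', cs.getD (n - 1 - i) ' '),
   pvCostC (pvBaseC (cs.getD i ' ', cs.getD (n - 1 - i) ' '),
            (cs.getD i ' ', cs.getD (n - 1 - i) ' ')))

def pvMism (cs : List Char) (n : Nat) (l : List Nat) : Int :=
  ((l.filter (fun i => cs.getD i ' ' ≠ cs.getD (n - 1 - i) ' ')).length : Int)

lemma pvMism_cons (cs : List Char) (n : Nat) (i : Nat) (l : List Nat) :
    pvMism cs n (i :: l) =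
      (if cs.getD i ' ' ≠ cs.getD (n - 1 - i) ' ' then 1 else 0) + pvMism cs n l := by
  simp only [pvMism, List.filter_cons]
  split_ifs with h h' h' <;> simp_all <;> try omega

-- lock-step: A's fold equals pvG on the item list with spare budget ca - cr
lemma pv_fold_inv (cs : List Char) (n : Nat) (l : List Nat) :
    ∀ (nl : List Char) (ca cr : Int),
      let rA := l.foldl (pvStepA cs n) (nl, ca, cr)
      let gl := pvG (l.map (pvItem cs n)) (ca - cr)
      rA.1 = nl ++ gl.1 ∧ rA.2.1 - rA.2.2 = gl.2 ∧ rA.2.2 = cr - pvMism cs n l := by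
  induction l with
  | nil => intro nl ca cr; simp [pvG, pvMism]
  | cons i l ih =>
    intro nl ca cr
    simp only [List.foldl_cons, List.map_cons, pvMism_cons]
    set a := cs.getD i ' ' with ha
    set b := cs.getD (n - 1 - i) ' ' with hb
    by_cases hab : a = b
    · by_cases hup : a ≠ '9' ∧ ca ≥ cr + 2
      · have hb9 : ¬ (a = '9' ∨ b = '9') := by
          push_neg
          exact ⟨hup.1, fun h => hup.1 (hab.trans h)⟩
        have hItem : pvItem cs n i = (a, 2) := by
          simp only [pvItem, pvBaseC, pvCostC, ← ha, ← hb, ← hab, max_self]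
          simp [hup.1]
        have hA : pvStepA cs n (nl, ca, cr) i = (nl ++ ['9'], ca - 2, cr) := by
          simp only [pvStepA, ← ha, ← hb, if_pos hab, if_pos hup]
        have hG : pvG ((a, 2) :: l.map (pvItem cs n)) (ca - cr)
            = ('9' :: (pvG (l.map (pvItem cs n)) (ca - cr - 2)).1,
               (pvG (l.map (pvItem cs n)) (ca - cr - 2)).2) := by
          simp only [pvG]
          rw [if_pos ⟨by omega, by omega⟩]
        rw [hA, hItem, hG]
        have H := ih (nl ++ ['9']) (ca - 2) cr
        simp only at H
        rw [show ca - 2 - cr = ca - cr - 2 from by ring] at H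
        refine ⟨by simp [H.1], H.2.1, ?_⟩
        rw [H.2.2, if_neg (fun h => h hab)]; ring
      · have hItem : pvItem cs n i = (a, if a = '9' then 0 else 2) := by
          by_cases h9 : a = '9'
          · simp only [pvItem, pvBaseC, pvCostC, ← ha, ← hb]
            rw [if_pos (Or.inl h9)]
            simp [h9]
          · have hb9 : ¬ (a = '9' ∨ b = '9') := by
              push_neg
              exact ⟨h9, fun h => h9 (hab.trans h)⟩
            simp only [pvItem, pvBaseC, pvCostC, ← ha, ← hb, ← hab, max_self]
            simp [h9]
        have hA : pvStepA cs n (nl, ca, cr) i = (nl ++ [a], ca, cr) := by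
          simp only [pvStepA, ← ha, ← hb, if_pos hab, if_neg hup]
        have hG : pvG ((a, if a = '9' then 0 else 2) :: l.map (pvItem cs n)) (ca - cr)
            = (a :: (pvG (l.map (pvItem cs n)) (ca - cr)).1,
               (pvG (l.map (pvItem cs n)) (ca - cr)).2) := by
          simp only [pvG]
          rw [if_neg (by
            by_cases h9 : a = '9'
            · simp [h9]
            · have hlt : ¬ ca ≥ cr + 2 := fun hge => hup ⟨h9, hge⟩
              simp only [if_neg h9]
              omega)]
        rw [hA, hItem, hG]
        have H := ih (nl ++ [a]) ca cr
        simp only at H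
        refine ⟨by simp [H.1], H.2.1, ?_⟩
        rw [H.2.2, if_neg (fun h => h hab)]; ring
    · by_cases h9 : a = '9' ∨ b = '9'
      · have hItem : pvItem cs n i = ('9', 0) := by
          simp only [pvItem, pvCostC, pvBaseC, ← ha, ← hb]
          rw [if_pos h9]
          simp
        have hA : pvStepA cs n (nl, ca, cr) i = (nl ++ ['9'], ca - 1, cr - 1) := by
          simp only [pvStepA, ← ha, ← hb, if_neg hab, if_pos h9]
        have hG : pvG (('9', 0) :: l.map (pvItem cs n)) (ca - cr)
            = ('9' :: (pvG (l.map (pvItem cs n)) (ca - cr)).1,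
               (pvG (l.map (pvItem cs n)) (ca - cr)).2) := by
          simp only [pvG]
          rw [if_neg (by omega)]
        rw [hA, hItem, hG]
        have H := ih (nl ++ ['9']) (ca - 1) (cr - 1)
        simp only at H
        rw [show ca - 1 - (cr - 1) = ca - cr from by ring] at H
        refine ⟨by simp [H.1], H.2.1, ?_⟩
        rw [H.2.2, if_pos hab]; ring
      · rw [not_or] at h9
        have hmax9 : max a b ≠ '9' := by
          rcases max_choice a b with h | h <;> rw [h]
          · exact h9.1
          · exact h9.2
        have hItem : pvItem cs n i = (max a b, 1) := by
          simp only [pvItem, pvBaseC, pvCostC, ← ha, ← hb]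
          rw [if_neg (by tauto)]
          simp [hmax9, hab]
        by_cases hup : ca ≥ cr + 1
        · have hA : pvStepA cs n (nl, ca, cr) i = (nl ++ ['9'], ca - 2, cr - 1) := by
            simp only [pvStepA, ← ha, ← hb, if_neg hab,
              if_neg (show ¬ (a = '9' ∨ b = '9') from by tauto), if_pos hup]
          have hG : pvG ((max a b, 1) :: l.map (pvItem cs n)) (ca - cr)
              = ('9' :: (pvG (l.map (pvItem cs n)) (ca - cr - 1)).1,
                 (pvG (l.map (pvItem cs n)) (ca - cr - 1)).2) := by
            simp only [pvG]
            rw [if_pos ⟨by omega, by omega⟩]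
          rw [hA, hItem, hG]
          have H := ih (nl ++ ['9']) (ca - 2) (cr - 1)
          simp only at H
          rw [show ca - 2 - (cr - 1) = ca - cr - 1 from by ring] at H
          refine ⟨by simp [H.1], H.2.1, ?_⟩
          rw [H.2.2, if_pos hab]; ring
        · have hA : pvStepA cs n (nl, ca, cr) i = (nl ++ [max a b], ca - 1, cr - 1) := by
            simp only [pvStepA, ← ha, ← hb, if_neg hab,
              if_neg (show ¬ (a = '9' ∨ b = '9') from by tauto), if_neg hup]
          have hG : pvG ((max a b, 1) :: l.map (pvItem cs n)) (ca - cr)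
              = (max a b :: (pvG (l.map (pvItem cs n)) (ca - cr)).1,
                 (pvG (l.map (pvItem cs n)) (ca - cr)).2) := by
            simp only [pvG]
            rw [if_neg (by omega)]
          rw [hA, hItem, hG]
          have H := ih (nl ++ [max a b]) (ca - 1) (cr - 1)
          simp only at H
          rw [show ca - 1 - (cr - 1) = ca - cr from by ring] at H
          refine ⟨by simp [H.1], H.2.1, ?_⟩
          rw [H.2.2, if_pos hab]; ring

lemma pvG_zero (items : List (Char × Int)) : pvG items 0 = (items.map Prod.fst, 0) := by
  induction items with
  | nil => simp [pvG]
  | cons p t ih =>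
    obtain ⟨c, w⟩ := p
    simp only [pvG, List.map_cons]
    rw [if_neg (by omega), ih]

lemma pvG_one (items : List (Char × Int)) :
    pvG items 1 = ((pvUpgrade (items.map Prod.fst) (items.map Prod.snd) 1).1,
                   1 - (pvUpgrade (items.map Prod.fst) (items.map Prod.snd) 1).2) := by
  induction items with
  | nil => simp [pvG, pvUpgrade]
  | cons p t ih =>
    obtain ⟨c, w⟩ := p
    by_cases hw : w = 1
    · subst hw
      simp only [pvG, List.map_cons]
      rw [if_pos (by omega)]
      norm_num [pvG_zero]
      simp [pvUpgrade, List.findIdx?_cons]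
    · simp only [pvG, List.map_cons]
      rw [if_neg (by omega), ih]
      simp only [pvUpgrade, List.findIdx?_cons]
      have hw' : (w == 1) = false := by simp [hw]
      rw [hw']
      cases hfi : List.findIdx? (fun w => w == 1) (t.map Prod.snd) with
      | none => simp
      | some j => simp [List.take_succ_cons, List.drop_succ_cons]

-- pvG computed in closed form: prefix-sum cutoff plus at most one extra cost-1 upgrade
lemma pvG_closed (items : List (Char × Int)) : ∀ (k : Int), 0 ≤ k →
    (∀ p ∈ items, (p.2 = 0 → p.1 = '9') ∧ 0 ≤ p.2 ∧ p.2 ≤ 2) →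
    pvG items k =
      (List.replicate (pvFindCut (items.map Prod.snd) k).2 '9' ++
         (pvUpgrade ((items.map Prod.fst).drop (pvFindCut (items.map Prod.snd) k).2)
            ((items.map Prod.snd).drop (pvFindCut (items.map Prod.snd) k).2)
            (k - (pvFindCut (items.map Prod.snd) k).1)).1,
       k - ((pvFindCut (items.map Prod.snd) k).1 +
         (pvUpgrade ((items.map Prod.fst).drop (pvFindCut (items.map Prod.snd) k).2)
            ((items.map Prod.snd).drop (pvFindCut (items.map Prod.snd) k).2)
            (k - (pvFindCut (items.map Prod.snd) k).1)).2)) := by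
  induction items with
  | nil =>
    intro k hk _
    simp only [pvG, List.map_nil, pvFindCut, List.drop_nil, pvUpgrade, List.findIdx?_nil]
    split_ifs <;> simp
  | cons p t ih =>
    obtain ⟨c, w⟩ := p
    intro k hk hinv
    have hhead := hinv (c, w) (List.mem_cons_self ..)
    have htail := fun p hp => hinv p (List.mem_cons_of_mem _ hp)
    simp only [List.map_cons, pvFindCut]
    by_cases hbk : w > k
    · rw [if_pos hbk]
      have hk01 : k = 0 ∨ k = 1 := by
        have := hhead.2.2; omega
      rcases hk01 with rfl | rfl
      · rw [pvG_zero]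
        simp [pvUpgrade, List.map_cons]
      · rw [pvG_one]
        simp [List.map_cons]
    · rw [if_neg hbk]
      have hwk : w ≤ k := by omega
      have ihh := ih (k - w) (by omega) htail
      have harith : k - (w + (pvFindCut (t.map Prod.snd) (k - w)).1)
          = k - w - (pvFindCut (t.map Prod.snd) (k - w)).1 := by ring
      by_cases hw0 : 0 < w
      · simp only [pvG]
        rw [if_pos ⟨hw0, hwk⟩, ihh]
        simp only [List.drop_succ_cons, List.replicate_succ, List.cons_append, harith,
          Prod.mk.injEq]
        exact ⟨trivial, by ring⟩
      · have hw0' : w = 0 := by have := hhead.2.1; omega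
        subst hw0'
        have hc9 : c = '9' := hhead.1 rfl
        subst hc9
        simp only [pvG]
        rw [if_neg (by omega)]
        norm_num at ihh harith ⊢
        rw [ihh]
        simp only [List.replicate_succ, List.cons_append]
        exact ⟨trivial, trivial⟩

-- B's zip-of-slices pair list written by pair index
lemma pv_pairs_eq (cs : List Char) :
    (cs.take (cs.length / 2)).zip ((cs.drop (cs.length - cs.length / 2)).reverse)
      = (List.range (cs.length / 2)).map
          (fun i => (cs.getD i ' ', cs.getD (cs.length - 1 - i) ' ')) := by
  have hhalf : cs.length / 2 ≤ cs.length := Nat.div_le_self _ _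
  apply List.ext_getElem
  · simp
    omega
  · intro i h1 h2
    simp only [List.getElem_zip, List.getElem_take, List.getElem_reverse, List.getElem_drop,
      List.getElem_map, List.getElem_range]
    have hi : i < cs.length / 2 := by
      simp at h1
      omega
    have hgoal1 : cs.getD i ' ' = cs[i]'(by omega) := List.getD_eq_getElem _ _ (by omega)
    have hgoal2 : cs.getD (cs.length - 1 - i) ' ' = cs[cs.length - 1 - i]'(by omega) :=
      List.getD_eq_getElem _ _ (by omega)
    rw [hgoal1, hgoal2]
    simp only [List.length_drop]
    have hidx : cs.length - cs.length / 2 + (cs.length - (cs.length - cs.length / 2) - 1 - i)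
        = cs.length - 1 - i := by omega
    simp only [hidx]

lemma pv_mismB_eq (cs : List Char) :
    ((((List.range (cs.length / 2)).map
        (fun i => (cs.getD i ' ', cs.getD (cs.length - 1 - i) ' '))).filter
        (fun p => p.1 ≠ p.2)).length : Int) = pvNonMatchingCount cs := by
  rw [List.filter_map, List.length_map]
  unfold pvNonMatchingCount
  norm_cast
  congr 1
  apply List.filter_congr
  intro i _
  simp [Function.comp, Nat.sub_right_comm]

lemma pv_mismA_eq (cs : List Char) :
    pvMism cs cs.length (List.range (cs.length / 2)) = pvNonMatchingCount cs := by
  unfold pvMism pvNonMatchingCount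
  norm_cast
  congr 1
  apply List.filter_congr
  intro i _
  simp [Nat.sub_right_comm]

lemma pv_items_fst (cs : List Char) (l : List Nat) :
    (l.map (fun i => (cs.getD i ' ', cs.getD (cs.length - 1 - i) ' '))).map pvBaseC
      = (l.map (pvItem cs cs.length)).map Prod.fst := by
  simp only [List.map_map]
  apply List.map_congr_left
  intro i _
  rfl

lemma pv_items_snd (cs : List Char) (l : List Nat) :
    ((((l.map (fun i => (cs.getD i ' ', cs.getD (cs.length - 1 - i) ' '))).map pvBaseC).zip
        (l.map (fun i => (cs.getD i ' ', cs.getD (cs.length - 1 - i) ' ')))).map pvCostC)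
      = (l.map (pvItem cs cs.length)).map Prod.snd := by
  rw [List.map_map, List.zip_map']
  simp only [List.map_map]
  apply List.map_congr_left
  intro i _
  rfl

lemma pv_items_inv (cs : List Char) (l : List Nat) :
    ∀ p ∈ l.map (pvItem cs cs.length), (p.2 = 0 → p.1 = '9') ∧ 0 ≤ p.2 ∧ p.2 ≤ 2 := by
  intro p hp
  simp only [List.mem_map] at hp
  obtain ⟨i, _, rfl⟩ := hp
  simp only [pvItem, pvCostC]
  split_ifs with hbase hne
  · exact ⟨fun _ => hbase, by norm_num⟩
  · exact ⟨fun h => absurd h (by norm_num), by norm_num⟩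
  · exact ⟨fun h => absurd h (by norm_num), by norm_num⟩

-- ===== VERDICT (by name: the statement is the Claim_ definition above) =====
theorem highest_palindrome_spec : Claim_equal_highest_palindrome := by
  intro s ca _ hpre
  have hpre' : pvNonMatchingCount s.toList ≤ ca := hpre
  unfold Spec_highest_palindrome
  simp only [highest_palindrome, highest_palindrome_alt]
  rw [pv_pairs_eq s.toList, pv_mismB_eq s.toList]
  rw [if_neg (by omega), if_neg (by omega)]
  rw [pv_items_snd, pv_items_fst]
  set F := List.foldl (pvStepA s.toList s.toList.length)
    ([], ca, pvNonMatchingCount s.toList) (List.range (s.toList.length / 2)) with hF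
  set items := (List.range (s.toList.length / 2)).map (pvItem s.toList s.toList.length)
    with hitems
  set k := ca - pvNonMatchingCount s.toList with hk
  have Hfold := pv_fold_inv s.toList s.toList.length (List.range (s.toList.length / 2))
    [] ca (pvNonMatchingCount s.toList)
  simp only [← hF, ← hitems, ← hk] at Hfold
  obtain ⟨h1, h2, h3⟩ := Hfold
  rw [pv_mismA_eq] at h3
  have hG := pvG_closed items k (by omega) (pv_items_inv s.toList (List.range (s.toList.length / 2)))
  have hA2 : F.2.1 = (pvG items k).2 := by omega
  rw [h1, hA2, List.nil_append, hG]
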